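-- pv_equiv track=rewrite | github.com/zheng-ji/ToyCollection | awesome-py-tool/utils/server/xxtea.py | uint32Tobyte
-- ===== SOURCE A (Python) =====
-- def uint32Tobyte(u):
--     loop = int(len(u))
--     b = [0] * loop * 4
--     for i in range(0, loop):
--         s = u[i]
--         b[i*4] = s % 256
--         b[i*4+1] = (s >> 8) % 256
--         b[i*4+2] = (s >> 16) % 256
--         b[i*4+3] = (s >> 24) % 256
--     bc = ""
--     for x in b:
--         bc += chr(x)
--     return bc
-- ===== SOURCE B (Python) =====
-- def uint32Tobyte(u):
--     # Pack all words into one big integer (word i at bit 32*i) by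
--     # divide-and-conquer, then emit it as little-endian bytes in one shot.
--     def pack(v):
--         if not v:
--             return 0
--         if len(v) == 1:
--             return v[0] % 4294967296
--         k = len(v) // 2
--         return pack(v[:k]) + pack(v[k:]) * 2 ** (32 * k)
--     return pack(u).to_bytes(4 * len(u), 'little').decode('latin-1')
-- ===== Notes on version B (the rewrite author's own statement) =====
-- stated objective: alternative
-- what changed: B packs all words into a single big integer by divide-and-conquer (low half plus high half scaled by 2^(32k)) and converts it once with int.to_bytes(..., 'little'), instead of A's per-word byte extraction into an index-filled list followed by chr-by-chr string concatenation.
import Mathlib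
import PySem

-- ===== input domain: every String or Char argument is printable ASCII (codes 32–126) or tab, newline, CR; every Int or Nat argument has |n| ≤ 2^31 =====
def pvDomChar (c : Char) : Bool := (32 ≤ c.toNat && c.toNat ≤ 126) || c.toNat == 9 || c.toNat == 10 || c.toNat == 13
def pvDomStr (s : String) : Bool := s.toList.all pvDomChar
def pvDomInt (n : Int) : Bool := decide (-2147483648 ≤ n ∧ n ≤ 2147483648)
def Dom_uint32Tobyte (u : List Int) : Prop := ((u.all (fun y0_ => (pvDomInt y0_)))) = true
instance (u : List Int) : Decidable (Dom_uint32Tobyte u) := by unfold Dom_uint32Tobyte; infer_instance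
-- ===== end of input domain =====

-- B packs all words into one big integer by divide-and-conquer and converts it once to
-- little-endian bytes, instead of A's per-word extraction into a list plus string concatenation
-- (alternative algorithm; same result).

-- ===== PORT A =====
-- Python 's >> k' on int is the arithmetic shift = floor division by 2^k (exact, also for negative s).
def uint32Tobyte (u : List Int) : String :=
  let loop : Int := PySem.List.len u
  let b0 : List Int := List.replicate ((loop * 4).toNat) 0
  let b : List Int := (PySem.List.pyRange 0 loop 1).foldl (fun b i =>
      let s := PySem.List.pyGetD u i 0      -- u[i]; i ∈ range(loop) is always in range
      let b := PySem.List.pySetD b (i * 4) (PySem.Int.mod s 256)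
      let b := PySem.List.pySetD b (i * 4 + 1) (PySem.Int.mod (PySem.Int.floordiv s 256) 256)
      let b := PySem.List.pySetD b (i * 4 + 2) (PySem.Int.mod (PySem.Int.floordiv s 65536) 256)
      PySem.List.pySetD b (i * 4 + 3) (PySem.Int.mod (PySem.Int.floordiv s 16777216) 256))
    b0
  let bc : List Char := b.foldl (fun bc x => bc ++ [Char.ofNat x.toNat]) []  -- bc += chr(x)
  String.ofList bc

-- ===== PORT B =====
-- pack(v): big integer holding word i of v at bit 32*i; v[:k]/v[k:] with 0 ≤ k ≤ len(v)
-- are exactly List.take/List.drop; 'x * 2 ** (32*k)' is Source B's scaling of the high half.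
def pvPack : List Int → Int
  | [] => 0
  | [w] => PySem.Int.mod w 4294967296
  | a :: b :: t =>
      pvPack ((a :: b :: t).take ((a :: b :: t).length / 2)) +
      pvPack ((a :: b :: t).drop ((a :: b :: t).length / 2)) * 2 ^ (32 * ((a :: b :: t).length / 2))
termination_by v => v.length
decreasing_by
  · simp; omega
  · simp; omega

-- n.to_bytes(c, 'little') for n ≥ 0: the c little-endian base-256 digits of n (exact hand port).
def pvDigitsLE : Nat → Int → List Int
  | 0, _ => []
  | c + 1, m => m % 256 :: pvDigitsLE c (m / 256)

def uint32Tobyte_alt (u : List Int) : String :=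
  let bytes := pvDigitsLE (4 * u.length) (pvPack u)           -- pack(u).to_bytes(4*len(u), 'little')
  String.ofList (bytes.map (fun x => Char.ofNat x.toNat))     -- .decode('latin-1')

-- ===== PRECONDITION & SPEC =====
def Spec_uint32Tobyte (u : List Int) (out : String) : Prop := out = uint32Tobyte_alt u
instance (u : List Int) (out : String) : Decidable (Spec_uint32Tobyte u out) := by unfold Spec_uint32Tobyte; infer_instance

-- ===== CLAIM (what is proved, stated in full; the proofs are below) =====
def Claim_equal_uint32Tobyte : Prop := ∀ (u : List Int), Dom_uint32Tobyte u → Spec_uint32Tobyte u (uint32Tobyte u)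

-- ===== LEMMAS AND PROOFS =====

/-- The four little-endian bytes of a word, as A computes them. -/
def pvBytes4 (s : Int) : List Int :=
  [PySem.Int.mod s 256, PySem.Int.mod (PySem.Int.floordiv s 256) 256,
   PySem.Int.mod (PySem.Int.floordiv s 65536) 256,
   PySem.Int.mod (PySem.Int.floordiv s 16777216) 256]

/-- A's loop body. -/
def pvStep (u : List Int) (b : List Int) (i : Int) : List Int :=
  let s := PySem.List.pyGetD u i 0
  let b := PySem.List.pySetD b (i * 4) (PySem.Int.mod s 256)
  let b := PySem.List.pySetD b (i * 4 + 1) (PySem.Int.mod (PySem.Int.floordiv s 256) 256)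
  let b := PySem.List.pySetD b (i * 4 + 2) (PySem.Int.mod (PySem.Int.floordiv s 65536) 256)
  PySem.List.pySetD b (i * 4 + 3) (PySem.Int.mod (PySem.Int.floordiv s 16777216) 256)

lemma pvLen_flatMap_bytes4 (l : List Int) : (l.flatMap pvBytes4).length = 4 * l.length := by
  induction l with
  | nil => simp
  | cons x t ih => simp [List.flatMap_cons, ih, pvBytes4]; omega

lemma pvFill (d : Nat) : ∀ (u : List Int) (k : Nat), u.length = k + d →
    (PySem.List.pyRange (k : Int) (u.length : Int) 1).foldl (pvStep u)
      ((u.take k).flatMap pvBytes4 ++ List.replicate (4 * d) 0) = u.flatMap pvBytes4 := by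
  induction d with
  | zero =>
    intro u k h
    rw [PySem.List.pyRange_one_eq_nil (by omega)]
    rw [List.take_of_length_le (by omega)]; simp
  | succ d ih =>
    intro u k h
    rw [PySem.List.pyRange_one_cons (by exact_mod_cast (by omega : (k:Int) < u.length))]
    rw [List.foldl_cons]
    have hk : k < u.length := by omega
    have hstep : pvStep u ((u.take k).flatMap pvBytes4 ++ List.replicate (4 * (d+1)) 0) (k : Int)
        = (u.take (k+1)).flatMap pvBytes4 ++ List.replicate (4 * d) 0 := by
      unfold pvStep
      have hs : PySem.List.pyGetD u (k : Int) 0 = u[k] := by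
        simp [PySem.List.pyGetD_natCast, List.getD_eq_getElem?_getD, hk]
      rw [hs]
      have h4 : ((k : Int) * 4) = ((4 * k : Nat) : Int) := by push_cast; ring
      have h41 : ((k : Int) * 4 + 1) = ((4 * k + 1 : Nat) : Int) := by push_cast; ring
      have h42 : ((k : Int) * 4 + 2) = ((4 * k + 2 : Nat) : Int) := by push_cast; ring
      have h43 : ((k : Int) * 4 + 3) = ((4 * k + 3 : Nat) : Int) := by push_cast; ring
      rw [h43, h42, h41, h4]
      simp only [PySem.List.pySetD_natCast]
      have hF : ((u.take k).flatMap pvBytes4).length = 4 * k := by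
        rw [pvLen_flatMap_bytes4, List.length_take]; omega
      have hrep : List.replicate (4 * (d+1)) (0 : Int)
          = 0 :: 0 :: 0 :: 0 :: List.replicate (4 * d) 0 := by
        have : 4 * (d+1) = (4 * d) + 1 + 1 + 1 + 1 := by omega
        simp [this, List.replicate_succ]
      have hset : ∀ (j : Nat) (R : List Int) (v : Int),
          (((u.take k).flatMap pvBytes4) ++ R).set (4 * k + j) v
          = ((u.take k).flatMap pvBytes4) ++ R.set j v := by
        intro j R v
        rw [← hF]
        simp only [le_add_iff_nonneg_right, zero_le, List.set_append_right,
          add_tsub_cancel_left]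
      have hset0 : ∀ (R : List Int) (v : Int),
          (((u.take k).flatMap pvBytes4) ++ R).set (4 * k) v
          = ((u.take k).flatMap pvBytes4) ++ R.set 0 v := by
        intro R v; simpa using hset 0 R v
      rw [hset0, hset 1, hset 2, hset 3, hrep]
      simp only [List.set]
      have htake : List.take (k+1) u = List.take k u ++ [u[k]] := by
        rw [List.take_add_one, List.getElem?_eq_getElem hk]; rfl
      rw [htake, List.flatMap_append, List.append_assoc]
      simp only [List.flatMap_cons, List.flatMap_nil, List.append_nil, pvBytes4]
      rfl
    rw [hstep]
    have : ((k : Int) + 1) = ((k + 1 : Nat) : Int) := by push_cast; ring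
    rw [this]
    exact ih u (k+1) (by omega)

/-- The big-integer value B computes, in sequential (foldr) form. -/
def pvBigN : List Int → Int
  | [] => 0
  | w :: t => pvBigN t * 4294967296 + w % 4294967296

lemma pvBigN_append (l r : List Int) :
    pvBigN (l ++ r) = pvBigN r * 2 ^ (32 * l.length) + pvBigN l := by
  induction l with
  | nil => simp [pvBigN]
  | cons w t ih =>
    simp only [List.cons_append, pvBigN, ih, List.length_cons]
    have : (2:Int) ^ (32 * (t.length + 1)) = 2 ^ (32 * t.length) * 4294967296 := by
      rw [Nat.mul_add]; rw [pow_add]; norm_num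
    rw [this]; ring

lemma pvPack_eq_bigN : ∀ (n : Nat) (u : List Int), u.length ≤ n → pvPack u = pvBigN u := by
  intro n
  induction n with
  | zero =>
    intro u h
    have : u = [] := List.eq_nil_of_length_eq_zero (by omega)
    subst this; simp [pvPack, pvBigN]
  | succ n ih =>
    intro u h
    match u with
    | [] => simp [pvPack, pvBigN]
    | [w] =>
      rw [pvPack]
      simp [pvBigN]
    | a :: b :: t =>
      rw [pvPack]
      have hlen : (a :: b :: t).length = t.length + 2 := by simp
      set k := (a :: b :: t).length / 2 with hkdef
      have hk1 : 1 ≤ k := by omega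
      have hk2 : k < (a :: b :: t).length := by omega
      have hT : ((a :: b :: t).take k).length = k := by
        rw [List.length_take]; omega
      have hD : ((a :: b :: t).drop k).length = (a :: b :: t).length - k := by
        rw [List.length_drop]
      rw [ih _ (by omega), ih _ (by omega)]
      have := pvBigN_append ((a :: b :: t).take k) ((a :: b :: t).drop k)
      rw [List.take_append_drop] at this
      rw [this, hT]; ring

/-- Peeling one word's four bytes off the big integer. -/
lemma pvDigits_step (c : Nat) (a b : Int) (ha : 0 ≤ a) (ha2 : a < 4294967296) :
    pvDigitsLE (4 * (c + 1)) (b * 4294967296 + a)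
      = [a% 256, (a/ 256)% 256, (a/ 65536)% 256, (a/ 16777216)% 256]
        ++ pvDigitsLE (4 * c) b := by
  have h1 : (b * 4294967296 + a)/ 256 = b * 16777216 + a/ 256 := by omega
  have h2 : (b * 16777216 + a/ 256)/ 256 = b * 65536 + a/ 65536 := by omega
  have h3 : (b * 65536 + a/ 65536)/ 256 = b * 256 + a/ 16777216 := by omega
  have h4 : (b * 256 + a/ 16777216)/ 256 = b := by omega
  have e1 : (b * 4294967296 + a)% 256 = a% 256 := by omega
  have e2 : (b * 16777216 + a/ 256)% 256 = (a/ 256)% 256 := by omega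
  have e3 : (b * 65536 + a/ 65536)% 256 = (a/ 65536)% 256 := by omega
  have e4 : (b * 256 + a/ 16777216)% 256 = (a/ 16777216)% 256 := by omega
  have hc : 4 * (c + 1) = 4 * c + 1 + 1 + 1 + 1 := by omega
  rw [hc]
  simp only [pvDigitsLE, h1, h2, h3, h4, e1, e2, e3, e4, List.cons_append, List.nil_append]

/-- A's four bytes of w are the low four base-256 digits of w mod 2^32. -/
lemma pvBytes4_eq_digits (w : Int) :
    pvBytes4 w = [(w % 4294967296)% 256, ((w % 4294967296)/ 256)% 256,
      ((w % 4294967296)/ 65536)% 256, ((w % 4294967296)/ 16777216)% 256] := by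
  unfold pvBytes4
  rw [PySem.Int.mod_eq_emod_of_pos (by norm_num : (0:Int) < 256),
      PySem.Int.floordiv_eq_ediv_of_pos (by norm_num : (0:Int) < 256),
      PySem.Int.floordiv_eq_ediv_of_pos (by norm_num : (0:Int) < 65536),
      PySem.Int.floordiv_eq_ediv_of_pos (by norm_num : (0:Int) < 16777216),
      PySem.Int.mod_eq_emod_of_pos (by norm_num : (0:Int) < 256),
      PySem.Int.mod_eq_emod_of_pos (by norm_num : (0:Int) < 256),
      PySem.Int.mod_eq_emod_of_pos (by norm_num : (0:Int) < 256)]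
  have g1 : (w / 256) % 256 = ((w % 4294967296)/ 256)% 256 := by omega
  have g2 : (w / 65536) % 256 = ((w % 4294967296)/ 65536)% 256 := by omega
  have g3 : (w / 16777216) % 256 = ((w % 4294967296)/ 16777216)% 256 := by omega
  have g0 : w % 256 = (w % 4294967296)% 256 := by omega
  rw [g0, g1, g2, g3]

lemma pvDigits_bigN : ∀ (u : List Int),
    pvDigitsLE (4 * u.length) (pvBigN u) = u.flatMap pvBytes4 := by
  intro u
  induction u with
  | nil => rfl
  | cons w t ih =>
    have ha : 0 ≤ w % 4294967296 := Int.emod_nonneg w (by norm_num)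
    have ha2 : w % 4294967296 < 4294967296 := Int.emod_lt_of_pos w (by norm_num)
    simp only [pvBigN, List.length_cons, List.flatMap_cons]
    rw [pvDigits_step t.length (w % 4294967296) (pvBigN t) ha ha2, ih, pvBytes4_eq_digits]

-- ===== VERDICT (by name: the statement is the Claim_ definition above) =====
theorem uint32Tobyte_spec : Claim_equal_uint32Tobyte := by
  intro u _
  unfold Spec_uint32Tobyte
  unfold uint32Tobyte uint32Tobyte_alt
  simp only [PySem.List.len_eq]
  rw [pvPack_eq_bigN u.length u (le_refl _), pvDigits_bigN]
  have hfill := pvFill u.length u 0 (by omega)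
  simp only [List.take_zero, List.flatMap_nil, List.nil_append, Nat.cast_zero] at hfill
  have hb0 : ((u.length : Int) * 4).toNat = 4 * u.length := by omega
  rw [hb0]
  show String.ofList (((PySem.List.pyRange 0 (u.length : Int) 1).foldl _ (List.replicate (4 * u.length) 0)).foldl _ []) = _
  have : (PySem.List.pyRange 0 (u.length : Int) 1).foldl (fun b i =>
      let s := PySem.List.pyGetD u i 0
      let b := PySem.List.pySetD b (i * 4) (PySem.Int.mod s 256)
      let b := PySem.List.pySetD b (i * 4 + 1) (PySem.Int.mod (PySem.Int.floordiv s 256) 256)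
      let b := PySem.List.pySetD b (i * 4 + 2) (PySem.Int.mod (PySem.Int.floordiv s 65536) 256)
      PySem.List.pySetD b (i * 4 + 3) (PySem.Int.mod (PySem.Int.floordiv s 16777216) 256))
      (List.replicate (4 * u.length) 0) = u.flatMap pvBytes4 := hfill
  rw [this]
  rw [PySem.List.foldl_append_singleton_eq_map]
  simp
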